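-- pv_equiv track=rewrite | github.com/priyanshum17/SDOH-Signalboard | services/patient_repository.py | _group_by_patient
-- ===== SOURCE A (Python) =====
-- from typing import Any, Dict, List, Tuple
--
-- def _group_by_patient(resources: List[Dict[str, Any]]) -> Dict[str, List[Dict[str, Any]]]:
--     """Helper to group a flat list of FHIR resources by their subject.reference Patient ID."""
--     grouped = {}
--     for res in resources:
--         ref = (res.get("subject") or {}).get("reference", "")
--         if ref.startswith("Patient/"):
--             pid = ref.split("/", 1)[1]
--             grouped.setdefault(pid, []).append(res)
--     return grouped
-- ===== SOURCE B (Python) =====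
-- from typing import Any, Dict, List
--
--
-- def _group_by_patient(resources: List[Dict[str, Any]]) -> Dict[str, List[Dict[str, Any]]]:
--     """Group FHIR resources by Patient reference ID: first collect (pid, resource)
--     pairs, then build the result per distinct pid (first-occurrence order)."""
--     pairs = []
--     for res in resources:
--         ref = (res.get("subject") or {}).get("reference", "")
--         if ref.startswith("Patient/"):
--             pairs.append((ref.split("/", 1)[1], res))
--     keys = list(dict.fromkeys(pid for pid, _ in pairs))
--     return {k: [r for p, r in pairs if p == k] for k in keys}
-- ===== Notes on version B (the rewrite author's own statement) =====
-- stated objective: alternative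
-- what changed: Replaces the single-pass setdefault-accumulating dict with a gather-then-group decomposition: one pass extracts (pid, resource) pairs, the distinct pids are taken in first-occurrence order, and the result dict is built by a per-key filter comprehension over the pairs.
import Mathlib
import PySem

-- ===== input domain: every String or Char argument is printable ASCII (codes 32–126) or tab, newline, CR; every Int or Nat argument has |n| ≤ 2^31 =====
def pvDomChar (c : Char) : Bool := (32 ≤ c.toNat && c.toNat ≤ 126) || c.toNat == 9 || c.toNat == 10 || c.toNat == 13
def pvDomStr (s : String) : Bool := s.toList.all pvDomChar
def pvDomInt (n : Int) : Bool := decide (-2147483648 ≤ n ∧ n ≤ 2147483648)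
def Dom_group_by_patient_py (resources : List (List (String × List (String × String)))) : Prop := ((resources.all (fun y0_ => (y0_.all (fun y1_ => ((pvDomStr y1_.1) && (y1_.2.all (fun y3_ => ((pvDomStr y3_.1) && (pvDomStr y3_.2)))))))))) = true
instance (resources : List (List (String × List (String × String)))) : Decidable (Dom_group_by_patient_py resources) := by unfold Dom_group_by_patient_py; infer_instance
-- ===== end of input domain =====

-- B replaces A's single-pass setdefault-accumulating dict by a gather-then-group
-- decomposition (extract (pid, res) pairs, dedup the pids, build each group by a
-- per-key filter); objective: alternative (not claimed faster).

-- A resource: a dict str -> dict str str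
abbrev PvR := List (String × List (String × String))

-- the literally identical lines of both Pythons:
-- ref = (res.get("subject") or {}).get("reference", ""); if ref.startswith("Patient/"): pid = ref.split("/", 1)[1]
-- (the [1] is List.getD: under the startswith guard the split always has a second piece)
def pvExtract (res : PvR) : Option (String × PvR) :=
  let subj := ((PySem.Dict.mk res).get? "subject").getD []
  let ref := (PySem.Dict.mk subj).getD "reference" ""
  if PySem.Str.startswith ref "Patient/" then
    some ((((PySem.Str.splitMax? ref "/" 1).getD []).getD 1 ""), res)
  else none

-- ===== PORT A =====
-- grouped.setdefault(pid, []).append(res) on the insertion-ordered dict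
def pvAppendAt (g : List (String × List PvR)) (pid : String) (res : PvR) : List (String × List PvR) :=
  match g with
  | [] => [(pid, [res])]
  | (k, v) :: rest => if k = pid then (k, v ++ [res]) :: rest else (k, v) :: pvAppendAt rest pid res

def group_by_patient_py (resources : List (List (String × List (String × String)))) : List (String × List (List (String × List (String × String)))) :=
  resources.foldl (fun grouped res =>
    match pvExtract res with
    | some (pid, r) => pvAppendAt grouped pid r
    | none => grouped) []

-- ===== PORT B =====
def group_by_patient_py_alt (resources : List (List (String × List (String × String)))) : List (String × List (List (String × List (String × String)))) :=
  let pairs := resources.foldl (fun ps res =>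
    match pvExtract res with
    | some pr => ps ++ [pr]
    | none => ps) []
  let keys := PySem.List.dedup (pairs.map (·.1))
  keys.map (fun k => (k, (pairs.filter (fun q => q.1 = k)).map (·.2)))

-- ===== PRECONDITION & SPEC =====
def Spec_group_by_patient_py (resources : List (List (String × List (String × String)))) (out : List (String × List (List (String × List (String × String))))) : Prop := out = group_by_patient_py_alt resources

-- decidable equality of the result type, assembled in small steps (plain typeclass
-- search exceeds the default synthesis size at this nesting depth)
def pvDecR : DecidableEq PvR := inferInstance
def pvDecOut : DecidableEq (List (String × List PvR)) :=
  @instDecidableEqList _ (@instDecidableEqProd _ _ inferInstance (@instDecidableEqList _ pvDecR))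
instance (resources : List (List (String × List (String × String)))) (out : List (String × List (List (String × List (String × String))))) : Decidable (Spec_group_by_patient_py resources out) := by unfold Spec_group_by_patient_py; exact pvDecOut _ _

-- ===== CLAIM (what is proved, stated in full; the proofs are below) =====
def Claim_equal_group_by_patient_py : Prop := ∀ (resources : List (List (String × List (String × String)))), Dom_group_by_patient_py resources → Spec_group_by_patient_py resources (group_by_patient_py resources)

-- ===== LEMMAS AND PROOFS =====

-- B's grouping, as a function of the extracted pairs
def pvGB (ps : List (String × PvR)) : List (String × List PvR) :=
  (PySem.List.dedup (ps.map (·.1))).map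
    (fun k => (k, (ps.filter (fun q => q.1 = k)).map (·.2)))

theorem pv_pairs_foldl (l : List PvR) (acc : List (String × PvR)) :
    l.foldl (fun ps res => match pvExtract res with | some pr => ps ++ [pr] | none => ps) acc
      = acc ++ l.filterMap pvExtract := by
  induction l generalizing acc with
  | nil => simp
  | cons x xs ih =>
    cases h : pvExtract x <;> simp [List.foldl_cons, h, ih]

theorem pv_A_foldl (l : List PvR) (g : List (String × List PvR)) :
    l.foldl (fun grouped res =>
        match pvExtract res with
        | some (pid, r) => pvAppendAt grouped pid r
        | none => grouped) g
      = (l.filterMap pvExtract).foldl (fun g pr => pvAppendAt g pr.1 pr.2) g := by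
  induction l generalizing g with
  | nil => simp
  | cons x xs ih =>
    cases h : pvExtract x with
    | none => simp [List.foldl_cons, h, ih]
    | some pr => simp [List.foldl_cons, h, ih]

theorem pv_appendAt_mem (ks : List String) (F : String → List PvR) (p : String) (r : PvR)
    (hnd : ks.Nodup) (hp : p ∈ ks) :
    pvAppendAt (ks.map (fun k => (k, F k))) p r
      = ks.map (fun k => (k, F k ++ if p = k then [r] else [])) := by
  induction ks with
  | nil => cases hp
  | cons k ks ih =>
    rcases List.nodup_cons.mp hnd with ⟨hk, hnd'⟩
    simp only [List.map_cons, pvAppendAt]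
    by_cases hkp : k = p
    · subst hkp
      rw [if_pos rfl, if_pos rfl]
      congr 1
      refine (List.map_congr_left ?_).symm
      intro a ha
      rw [if_neg (fun h : k = a => hk (by rw [h]; exact ha)), List.append_nil]
    · rcases List.mem_cons.mp hp with h | h
      · exact absurd h.symm hkp
      · rw [if_neg hkp, ih hnd' h, if_neg (fun hh : p = k => hkp hh.symm), List.append_nil]

theorem pv_appendAt_not_mem (ks : List String) (F : String → List PvR) (p : String) (r : PvR)
    (hp : p ∉ ks) :
    pvAppendAt (ks.map (fun k => (k, F k))) p r
      = ks.map (fun k => (k, F k)) ++ [(p, [r])] := by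
  induction ks with
  | nil => rfl
  | cons k ks ih =>
    have hkp : ¬ (k = p) := fun h => hp (h ▸ List.mem_cons_self)
    simp only [List.map_cons, pvAppendAt, if_neg hkp, List.cons_append]
    rw [ih (fun h => hp (List.mem_cons_of_mem _ h))]

theorem pv_gb_snoc (ps : List (String × PvR)) (pr : String × PvR) :
    pvGB (ps ++ [pr]) = pvAppendAt (pvGB ps) pr.1 pr.2 := by
  obtain ⟨p, r⟩ := pr
  have hdd : PySem.List.dedup ((ps ++ [(p, r)]).map (·.1))
      = PySem.Set.add (PySem.List.dedup (ps.map (·.1))) p := by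
    simp only [List.map_append, List.map_cons, List.map_nil,
      PySem.List.dedup_eq_ofList, PySem.Set.ofList_eq_foldl, List.foldl_append,
      List.foldl_cons, List.foldl_nil]
  have hmem : ∀ x, x ∈ PySem.List.dedup (ps.map (·.1)) ↔ x ∈ ps.map (·.1) := by
    intro x; simp [PySem.List.dedup_eq_ofList, PySem.Set.mem_ofList]
  have hnd : (PySem.List.dedup (ps.map (·.1))).Nodup := by
    simp [PySem.List.dedup_eq_ofList, PySem.Set.nodup_ofList]
  have hfil : ∀ k, ((ps ++ [(p, r)]).filter (fun q => q.1 = k)).map (·.2)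
      = (ps.filter (fun q => q.1 = k)).map (·.2) ++ (if p = k then [r] else []) := by
    intro k
    rw [List.filter_append, List.map_append]
    congr 1
    by_cases h : p = k <;> simp [h]
  by_cases hp : p ∈ PySem.List.dedup (ps.map (·.1))
  · have hadd : PySem.Set.add (PySem.List.dedup (ps.map (·.1))) p
        = PySem.List.dedup (ps.map (·.1)) := by
      have hc : (PySem.List.dedup (ps.map (·.1))).contains p = true :=
        List.contains_iff_mem.mpr hp
      simp only [PySem.Set.add, PySem.Set.contains, hc, if_true]
    simp only [pvGB]
    rw [hdd, hadd,
      pv_appendAt_mem _ (fun k => (ps.filter (fun q => q.1 = k)).map (·.2)) _ _ hnd hp]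
    refine List.map_congr_left ?_
    intro k _
    rw [hfil k]
  · have hadd : PySem.Set.add (PySem.List.dedup (ps.map (·.1))) p
        = PySem.List.dedup (ps.map (·.1)) ++ [p] := by
      have hc : (PySem.List.dedup (ps.map (·.1))).contains p = false := by
        rw [← Bool.not_eq_true]
        exact fun h => hp (List.contains_iff_mem.mp h)
      simp only [PySem.Set.add, PySem.Set.contains, hc]
      rfl
    have hnotps : p ∉ ps.map (·.1) := fun h => hp ((hmem p).mpr h)
    have hfilp : ps.filter (fun q => q.1 = p) = [] := by
      rw [List.filter_eq_nil_iff]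
      intro q hq
      simp only [decide_eq_true_eq]
      intro h; exact hnotps (h ▸ List.mem_map_of_mem hq)
    simp only [pvGB]
    rw [hdd, hadd, List.map_append, List.map_cons, List.map_nil,
      pv_appendAt_not_mem _ (fun k => (ps.filter (fun q => q.1 = k)).map (·.2)) _ _ hp]
    congr 1
    · refine List.map_congr_left ?_
      intro k hk
      rw [hfil k, if_neg (fun h : p = k => hp (h ▸ hk)), List.append_nil]
    · rw [hfil p, hfilp, if_pos rfl]
      simp

theorem pv_A_eq_gb (ps : List (String × PvR)) :
    ps.foldl (fun g pr => pvAppendAt g pr.1 pr.2) [] = pvGB ps := by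
  induction ps using List.reverseRecOn with
  | nil => rfl
  | append_singleton xs x ih =>
    rw [List.foldl_append, List.foldl_cons, List.foldl_nil, ih, pv_gb_snoc]

-- ===== VERDICT (by name: the statement is the Claim_ definition above) =====
theorem group_by_patient_py_spec : Claim_equal_group_by_patient_py := by
  intro resources _
  show group_by_patient_py resources = group_by_patient_py_alt resources
  rw [group_by_patient_py, group_by_patient_py_alt, pv_A_foldl, pv_pairs_foldl,
    List.nil_append, pv_A_eq_gb, pvGB]
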